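-- pv_equiv track=rewrite | github.com/Daethalous/2stepsP2C | workflow/planning.py | _select_primary_issue
-- ===== SOURCE A (Python) =====
-- def _select_primary_issue(issues: list[str]) -> str:
--     if not issues:
--         return "output format is invalid"
--     priority_markers = (
--         "payload is not valid JSON",
--         "missing required keys",
--         "must not include",
--         "must be",
--         "must belong to Task list",
--         "contains invalid",
--         "references unknown file",
--         "contains non-structural reference",
--         "feature/baseline contract conflict",
--     )
--     for marker in priority_markers:
--         for issue in issues:
--             if marker in issue:
--                 return issue
--     return issues[0]
-- ===== SOURCE B (Python) =====
-- def _select_primary_issue(issues: list[str]) -> str: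
--     if not issues:
--         return "output format is invalid"
--     priority_markers = (
--         "payload is not valid JSON",
--         "missing required keys",
--         "must not include",
--         "must be",
--         "must belong to Task list",
--         "contains invalid",
--         "references unknown file",
--         "contains non-structural reference",
--         "feature/baseline contract conflict",
--     )
--
--     def rank(issue: str) -> int:
--         for idx, marker in enumerate(priority_markers):
--             if marker in issue:
--                 return idx
--         return len(priority_markers)
--
--     best = issues[0]
--     best_rank = rank(best)
--     for issue in issues[1:]:
--         r = rank(issue)
--         if r < best_rank:
--             best, best_rank = issue, r
--     return best
-- ===== Notes on version B (the rewrite author's own statement) =====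
-- stated objective: alternative
-- what changed: Replaced the marker-outer/issue-inner double scan (restarting over all issues for every marker) by a single pass over the issues that computes each issue's priority rank (index of the first matching marker, or the marker count if none) and keeps the first issue with the smallest rank.
import Mathlib
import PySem

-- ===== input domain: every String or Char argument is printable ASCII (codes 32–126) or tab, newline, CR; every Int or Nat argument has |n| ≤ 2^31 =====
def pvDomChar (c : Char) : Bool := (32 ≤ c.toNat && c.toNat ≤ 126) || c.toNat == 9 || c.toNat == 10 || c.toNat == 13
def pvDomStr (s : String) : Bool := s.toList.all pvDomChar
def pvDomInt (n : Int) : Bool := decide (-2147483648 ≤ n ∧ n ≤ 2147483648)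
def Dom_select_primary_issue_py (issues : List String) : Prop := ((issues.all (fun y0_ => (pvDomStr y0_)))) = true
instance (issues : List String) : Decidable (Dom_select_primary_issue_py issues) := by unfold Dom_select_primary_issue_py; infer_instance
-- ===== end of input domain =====

-- B replaces A's marker-outer/issue-inner double scan by one pass over the issues keeping the first issue of minimal marker rank (alternative decomposition, same cost).

def pvMarkers : List String :=
  ["payload is not valid JSON", "missing required keys", "must not include",
   "must be", "must belong to Task list", "contains invalid",
   "references unknown file", "contains non-structural reference",
   "feature/baseline contract conflict"]

-- ===== PORT A =====
-- outer loop over markers; inner 'for issue in issues: if marker in issue: return issue' is find?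
def pvScan : List String → List String → Option String
  | [], _ => none
  | m :: ms, issues =>
    match issues.find? (fun issue => PySem.Str.isIn m issue) with
    | some issue => some issue
    | none => pvScan ms issues

def select_primary_issue_py (issues : List String) : String :=
  match issues with
  | [] => "output format is invalid"
  | x :: _ =>
    match pvScan pvMarkers issues with
    | some issue => issue
    | none => x

-- ===== PORT B =====
-- rank(issue) = index of first matching marker, or len(markers) if none
def pvRank (ms : List String) (issue : String) : Nat :=
  ms.findIdx (fun m => PySem.Str.isIn m issue)

def select_primary_issue_py_alt (issues : List String) : String :=
  match issues with
  | [] => "output format is invalid"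
  | x :: xs =>
    (xs.foldl
      (fun acc issue =>
        if pvRank pvMarkers issue < acc.2 then (issue, pvRank pvMarkers issue) else acc)
      (x, pvRank pvMarkers x)).1

-- ===== PRECONDITION & SPEC =====
def Spec_select_primary_issue_py (issues : List String) (out : String) : Prop := out = select_primary_issue_py_alt issues
instance (issues : List String) (out : String) : Decidable (Spec_select_primary_issue_py issues out) := by unfold Spec_select_primary_issue_py; infer_instance

-- ===== CLAIM (what is proved, stated in full; the proofs are below) =====
def Claim_equal_select_primary_issue_py : Prop := ∀ (issues : List String), Dom_select_primary_issue_py issues → Spec_select_primary_issue_py issues (select_primary_issue_py issues)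

-- ===== LEMMAS AND PROOFS =====

-- minimal rank over a list of issues (base: ms.length = rank of a no-match issue)
def pvMr (ms : List String) (l : List String) : Nat :=
  l.foldr (fun i acc => min (pvRank ms i) acc) ms.length

-- first issue achieving the minimal rank (the common value of both ports)
def pvFA (ms : List String) (x : String) (xs : List String) : String :=
  (((x :: xs).find? (fun i => pvRank ms i == pvMr ms (x :: xs)))).getD x

theorem pvRank_le (ms : List String) (i : String) : pvRank ms i ≤ ms.length :=
  List.findIdx_le_length

theorem pvMr_cons (ms : List String) (x : String) (l : List String) :
    pvMr ms (x :: l) = min (pvRank ms x) (pvMr ms l) := rfl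

theorem pvMr_le (ms : List String) (l : List String) : pvMr ms l ≤ ms.length := by
  induction l with
  | nil => simp [pvMr]
  | cons x l ih => rw [pvMr_cons]; omega

theorem pvMr_le_rank (ms : List String) (l : List String) (i : String) (h : i ∈ l) :
    pvMr ms l ≤ pvRank ms i := by
  induction l with
  | nil => cases h
  | cons x l ih =>
    rw [pvMr_cons]
    rcases List.mem_cons.mp h with h | h
    · subst h; omega
    · have := ih h; omega

theorem pvRank_cons (m : String) (ms : List String) (i : String) :
    pvRank (m :: ms) i = if PySem.Str.isIn m i then 0 else pvRank ms i + 1 := by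
  simp [pvRank, List.findIdx_cons]

theorem pvMr_succ (m : String) (ms : List String) (l : List String)
    (h : ∀ i ∈ l, PySem.Str.isIn m i = false) :
    pvMr (m :: ms) l = pvMr ms l + 1 := by
  induction l with
  | nil => simp [pvMr]
  | cons x l ih =>
    rw [pvMr_cons, pvMr_cons, pvRank_cons, h x (by simp),
      ih (fun i hi => h i (by simp [hi]))]
    simp

theorem pvFind?_congr_mem {α : Type} (l : List α) (p q : α → Bool)
    (h : ∀ a ∈ l, p a = q a) : l.find? p = l.find? q := by
  induction l with
  | nil => rfl
  | cons x l ih =>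
    rw [List.find?_cons, List.find?_cons, h x (by simp),
      ih (fun a ha => h a (by simp [ha]))]

-- a nonempty list always contains an achiever of the minimal rank
theorem pvAchiever (ms : List String) (l : List String) (hne : l ≠ []) :
    (l.find? (fun j => pvRank ms j == pvMr ms l)).isSome := by
  induction l with
  | nil => cases hne rfl
  | cons x l ih =>
    by_cases hx : pvRank ms x = pvMr ms (x :: l)
    · simp [hx]
    · have hle : pvRank ms x ≤ ms.length := pvRank_le ms x
      have hml : pvMr ms l ≤ ms.length := pvMr_le ms l
      have hmc := pvMr_cons ms x l
      have hlt : pvMr ms l < pvRank ms x := by omega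
      have hmr : pvMr ms (x :: l) = pvMr ms l := by omega
      cases l with
      | nil =>
        exfalso
        have hn : pvMr ms ([] : List String) = ms.length := rfl
        omega
      | cons y l' =>
        rw [List.find?_cons]
        have hpx : (pvRank ms x == pvMr ms (x :: y :: l')) = false := by
          simp [hx]
        rw [hpx, hmr]
        exact ih (by simp)

theorem pvScan_eq (ms : List String) (x : String) (xs : List String) :
    (match pvScan ms (x :: xs) with
     | some issue => issue
     | none => x) = pvFA ms x xs := by
  induction ms with
  | nil =>
    have h0 : pvRank [] x = 0 := rfl
    have hm : pvMr [] (x :: xs) = 0 := Nat.le_zero.mp (pvMr_le [] (x :: xs))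
    show x = pvFA [] x xs
    unfold pvFA
    rw [hm, List.find?_cons, h0]
    simp
  | cons m ms ih =>
    have hunf : pvScan (m :: ms) (x :: xs)
        = match (x :: xs).find? (fun issue => PySem.Str.isIn m issue) with
          | some issue => some issue
          | none => pvScan ms (x :: xs) := rfl
    rcases hf : (x :: xs).find? (fun issue => PySem.Str.isIn m issue) with _ | i
    · -- no issue contains m
      have hall : ∀ i ∈ x :: xs, PySem.Str.isIn m i = false := fun i hi => by
        have := List.find?_eq_none.mp hf i hi
        simpa using this
      have hscan : pvScan (m :: ms) (x :: xs) = pvScan ms (x :: xs) := by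
        rw [hunf, hf]
      rw [hscan, ih]
      unfold pvFA
      congr 1
      apply pvFind?_congr_mem
      intro i hi
      show (pvRank ms i == pvMr ms (x :: xs))
          = (pvRank (m :: ms) i == pvMr (m :: ms) (x :: xs))
      rw [pvRank_cons, hall i hi, pvMr_succ m ms (x :: xs) hall]
      by_cases h : pvRank ms i = pvMr ms (x :: xs) <;> simp [h]
    · -- i is the first issue containing m
      have hmem : i ∈ x :: xs := List.mem_of_find?_eq_some hf
      have hpi : PySem.Str.isIn m i = true := List.find?_some hf
      have hri : pvRank (m :: ms) i = 0 := by rw [pvRank_cons, hpi]; rfl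
      have hmr : pvMr (m :: ms) (x :: xs) = 0 := by
        have := pvMr_le_rank (m :: ms) (x :: xs) i hmem; omega
      have hscan : pvScan (m :: ms) (x :: xs) = some i := by
        rw [hunf, hf]
      rw [hscan]
      unfold pvFA
      rw [hmr, pvFind?_congr_mem _ _ (fun j => PySem.Str.isIn m j)
        (fun j _ => by
          show (pvRank (m :: ms) j == 0) = PySem.Str.isIn m j
          rw [pvRank_cons]
          cases h : PySem.Str.isIn m j <;> simp [h]),
        hf]
      rfl

-- B's fold returns the first achiever paired with the minimal rank
theorem pvFold_eq (ms : List String) (xs : List String) (x : String) :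
    xs.foldl
      (fun acc issue =>
        if pvRank ms issue < acc.2 then (issue, pvRank ms issue) else acc)
      (x, pvRank ms x) = (pvFA ms x xs, pvMr ms (x :: xs)) := by
  induction xs generalizing x with
  | nil =>
    have hxm : pvMr ms [x] = pvRank ms x := by
      have := pvRank_le ms x
      simp [pvMr]
      omega
    simp [pvFA, hxm]
  | cons i rest ih =>
    simp only [List.foldl_cons]
    by_cases hlt : pvRank ms i < pvRank ms x
    · -- new best is i
      rw [if_pos hlt, ih i]
      have hM : pvMr ms (i :: rest) ≤ pvRank ms i :=
        pvMr_le_rank ms (i :: rest) i (by simp)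
      have hmr : pvMr ms (x :: i :: rest) = pvMr ms (i :: rest) := by
        simp only [pvMr_cons]; omega
      have hpx : (pvRank ms x == pvMr ms (i :: rest)) = false := by
        simp only [beq_eq_false_iff_ne, ne_eq]; omega
      have hFA : pvFA ms x (i :: rest) = pvFA ms i rest := by
        unfold pvFA
        rw [hmr]
        by_cases hpi : (pvRank ms i == pvMr ms (i :: rest)) = true
        · simp only [List.find?_cons, hpx, hpi]
          rfl
        · have hpi' : (pvRank ms i == pvMr ms (i :: rest)) = false := by
            simpa using hpi
          simp only [List.find?_cons, hpx, hpi']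
          rcases hs : rest.find? (fun j => pvRank ms j == pvMr ms (i :: rest))
            with _ | a
          · exfalso
            have hach := pvAchiever ms (i :: rest) (by simp)
            rw [List.find?_cons] at hach
            rw [hpi', hs] at hach
            simp at hach
          · rfl
      rw [hFA, hmr]
    · -- keep x
      rw [if_neg hlt, ih x]
      have hxi : pvRank ms x ≤ pvRank ms i := Nat.le_of_not_lt hlt
      have hmr : pvMr ms (x :: i :: rest) = pvMr ms (x :: rest) := by
        simp only [pvMr_cons]; omega
      have hFA : pvFA ms x (i :: rest) = pvFA ms x rest := by
        unfold pvFA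
        rw [hmr]
        by_cases hpx : (pvRank ms x == pvMr ms (x :: rest)) = true
        · simp only [List.find?_cons, hpx]
        · have hpx' : (pvRank ms x == pvMr ms (x :: rest)) = false := by
            simpa using hpx
          have hmx : pvMr ms (x :: rest) = min (pvRank ms x) (pvMr ms rest) :=
            pvMr_cons ms x rest
          have hxne : pvRank ms x ≠ pvMr ms (x :: rest) := by simpa using hpx
          have hMlt : pvMr ms (x :: rest) < pvRank ms x := by omega
          have hpi : (pvRank ms i == pvMr ms (x :: rest)) = false := by
            simp only [beq_eq_false_iff_ne, ne_eq]; omega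
          simp only [List.find?_cons, hpx', hpi]
      rw [hFA, hmr]

-- ===== VERDICT (by name: the statement is the Claim_ definition above) =====
theorem select_primary_issue_py_spec : Claim_equal_select_primary_issue_py := by
  intro issues _
  unfold Spec_select_primary_issue_py
  cases issues with
  | nil => rfl
  | cons x xs =>
    show (match pvScan pvMarkers (x :: xs) with
          | some issue => issue
          | none => x) = _
    rw [pvScan_eq]
    show _ = (xs.foldl _ (x, pvRank pvMarkers x)).1
    rw [pvFold_eq]
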